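-- pv_equiv track=rewrite | github.com/Odyseus/python_utils | html2text/utils.py | reformat_table
-- ===== SOURCE A (Python) =====
-- def reformat_table(lines: list[str], right_margin: int) -> list[str]:
--     """Given the lines of a table padds the cells and returns the new lines.
--
--     Parameters
--     ----------
--     lines : list[str]
--         Description
--     right_margin : int
--         Description
--
--     Returns
--     -------
--     list[str]
--         Description
--     """
--     # find the maximum width of the columns
--     max_width = [len(x.rstrip()) + right_margin for x in lines[0].split("|")]
--     max_cols = len(max_width)
--     for line in lines:
--         cols = [x.rstrip() for x in line.split("|")]
--         num_cols = len(cols)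
--
--         # don't drop any data if colspan attributes result in unequal lengths
--         if num_cols < max_cols:
--             cols += [""] * (max_cols - num_cols)
--         elif max_cols < num_cols:
--             max_width += [len(x) + right_margin for x in cols[-(num_cols - max_cols):]]
--             max_cols = num_cols
--
--         max_width = [max(len(x) + right_margin, old_len) for x, old_len in zip(cols, max_width)]
--
--     # reformat
--     new_lines = []
--     for line in lines:
--         cols = [x.rstrip() for x in line.split("|")]
--         if set(line.strip()) == set("-|"):
--             filler = "-"
--             new_cols = [
--                 x.rstrip() + (filler * (M - len(x.rstrip()))) for x, M in zip(cols, max_width)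
--             ]
--         else:
--             filler = " "
--             new_cols = [
--                 x.rstrip() + (filler * (M - len(x.rstrip()))) for x, M in zip(cols, max_width)
--             ]
--         new_lines.append("|".join(new_cols))
--     return new_lines
-- ===== SOURCE B (Python) =====
-- def _pad_cols(items, right_margin):
--     # items: list of (remaining cells, filler char) pairs; build the output
--     # column by column, peeling the first cell of every still-live row.
--     live = [cells for cells, _ in items if cells]
--     if not live:
--         return ["" for _ in items]
--     width = right_margin + max(len(cells[0]) for cells in live)
--     tails = _pad_cols([(cells[1:], f) for cells, f in items], right_margin)
--     out = []
--     for (cells, f), tail in zip(items, tails):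
--         if not cells:
--             out.append("")
--         else:
--             cell = cells[0] + f * (width - len(cells[0]))
--             out.append(cell + ("|" + tail if len(cells) > 1 else ""))
--     return out
--
--
-- def reformat_table(lines, right_margin):
--     # Column-major construction: no widths table is kept; each recursion level
--     # handles one column. Returns [] for empty input where A raises.
--     items = [([c.rstrip() for c in line.split("|")],
--               "-" if set(line.strip()) == set("-|") else " ")
--              for line in lines]
--     return _pad_cols(items, right_margin)
-- ===== Notes on version B (the rewrite author's own statement) =====
-- stated objective: alternative
-- what changed: B builds the output column-by-column with a recursive peel: each recursion level takes the max head-cell length of the still-live rows as that column's width, pads those heads and recurses on the tails, so no per-column width table and no running-max accumulator exist; A makes two row-wise passes with an incrementally grown max-width list.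
-- crash fix: On lines = [] A raises IndexError at lines[0]; B naturally returns []. — e.g. on reformat_table([], 0): A raises IndexError, B returns []
import Mathlib
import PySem

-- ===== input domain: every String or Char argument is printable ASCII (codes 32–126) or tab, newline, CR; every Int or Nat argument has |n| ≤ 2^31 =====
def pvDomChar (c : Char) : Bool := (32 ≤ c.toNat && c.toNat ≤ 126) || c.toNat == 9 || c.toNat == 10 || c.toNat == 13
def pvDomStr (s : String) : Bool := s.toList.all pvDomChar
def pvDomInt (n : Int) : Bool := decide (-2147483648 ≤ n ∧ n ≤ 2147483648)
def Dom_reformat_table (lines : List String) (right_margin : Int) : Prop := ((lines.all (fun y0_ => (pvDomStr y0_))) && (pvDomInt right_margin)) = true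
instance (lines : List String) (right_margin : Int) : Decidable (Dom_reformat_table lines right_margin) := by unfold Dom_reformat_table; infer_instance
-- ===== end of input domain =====

-- B builds the output column-by-column with a recursive peel (one recursion level per
-- column, width = max head-cell length of the live rows) instead of A's two row-wise
-- passes over an incrementally grown max-width list (objective: alternative algorithm,
-- same cost); return values agree on all non-empty inputs, where A raises (lines = [])
-- B returns [].

-- shared string primitive (Python 'filler * n' on str)
def pvRepeat (s : String) (n : Int) : String := String.ofList (PySem.List.pyRepeat s.toList n)

-- ===== PORT A =====
-- cols = [x.rstrip() for x in line.split("|")]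
def pvCells (line : String) : List String :=
  ((PySem.Str.split? line "|").getD []).map PySem.Str.rstrip

-- the body of A's width loop
def pvStepA (rm : Int) (acc : List Int) (line : String) : List Int :=
  let cols := pvCells line
  let n := cols.length
  let m := acc.length
  if n < m then
    List.zipWith (fun x old => max (PySem.Str.len x + rm) old)
      (cols ++ List.replicate (m - n) "") acc
  else if m < n then
    let acc2 := acc ++ (PySem.List.slice cols (some (-((n - m : Nat) : Int))) none).map
      (fun x => PySem.Str.len x + rm)
    List.zipWith (fun x old => max (PySem.Str.len x + rm) old) cols acc2
  else
    List.zipWith (fun x old => max (PySem.Str.len x + rm) old) cols acc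

def reformat_table (lines : List String) (right_margin : Int) : List String :=
  match lines with
  | [] => []   -- Python raises IndexError at lines[0]; excluded by Pre_reformat_table
  | l0 :: _ =>
    let mw0 : List Int := ((PySem.Str.split? l0 "|").getD []).map
      (fun x => PySem.Str.len (PySem.Str.rstrip x) + right_margin)
    let mw := lines.foldl (pvStepA right_margin) mw0
    lines.map (fun line =>
      let cols := pvCells line
      if PySem.Set.equal (PySem.Set.ofList (PySem.Str.strip line).toList)
          (PySem.Set.ofList ['-', '|']) then
        PySem.Str.join "|" (List.zipWith
          (fun x M => PySem.Str.rstrip x ++ pvRepeat "-" (M - PySem.Str.len (PySem.Str.rstrip x)))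
          cols mw)
      else
        PySem.Str.join "|" (List.zipWith
          (fun x M => PySem.Str.rstrip x ++ pvRepeat " " (M - PySem.Str.len (PySem.Str.rstrip x)))
          cols mw))

-- ===== PORT B =====
-- termination of the column peel: dropping the head of every row strictly shrinks the
-- total number of cells as long as some row is still live (cited by decreasing_by)
theorem pvSumTails_le (items : List (List String × String)) :
    ((items.map (fun it => (it.1.drop 1, it.2))).map (fun it => it.1.length)).sum
      ≤ (items.map (fun it => it.1.length)).sum := by
  induction items with
  | nil => simp
  | cons a t ih =>
    simp only [List.map_cons, List.sum_cons, List.length_drop]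
    omega

theorem pvSumTails_lt (items : List (List String × String))
    (h : items.filter (fun it => !it.1.isEmpty) ≠ []) :
    ((items.map (fun it => (it.1.drop 1, it.2))).map (fun it => it.1.length)).sum
      < (items.map (fun it => it.1.length)).sum := by
  induction items with
  | nil => simp at h
  | cons a t ih =>
    by_cases ha : a.1.isEmpty
    · have ht : t.filter (fun it => !it.1.isEmpty) ≠ [] := by
        simpa [List.filter_cons, ha] using h
      have := ih ht
      simp only [List.map_cons, List.sum_cons, List.length_drop]
      omega
    · have h1 : 1 ≤ a.1.length := by
        cases hc : a.1 with
        | nil => rw [hc] at ha; simp at ha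
        | cons x xs => simp
      have := pvSumTails_le t
      simp only [List.map_cons, List.sum_cons, List.length_drop]
      omega

theorem pvMapAttach {A B : Type} (l : List A) (g : A -> B) :
    l.attach.map (fun x => g x.1) = l.map g := by simp

theorem pvSumTails_lt_attach (items : List (List String × String))
    (h : items.filter (fun it => !it.1.isEmpty) ≠ []) :
    ((items.attach.map (fun x : Subtype (Membership.mem items) =>
        (List.drop 1 (x : List String × String).1, (x : List String × String).2))).map
      (fun it => it.1.length)).sum
      < (items.map (fun it => it.1.length)).sum := by
  rw [pvMapAttach items (fun it => (it.1.drop 1, it.2))]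
  exact pvSumTails_lt items h

-- _pad_cols(items, right_margin) from Source B: recursion over columns
def pvPadCols (items : List (List String × String)) (right_margin : Int) : List String :=
  if hlive : items.filter (fun it => !it.1.isEmpty) = [] then
    items.map (fun _ => "")
  else
    let width := right_margin +
      (PySem.List.max? ((items.filter (fun it => !it.1.isEmpty)).map
        (fun it => PySem.Str.len (it.1.headD ""))) (fun x => x)).getD 0
    let tails := pvPadCols (items.map (fun it => (it.1.drop 1, it.2))) right_margin
    (items.zip tails).map (fun p =>
      match p.1.1 with
      | [] => ""
      | c :: cs =>
        (c ++ pvRepeat p.1.2 (width - PySem.Str.len c)) ++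
          (if cs.length > 0 then "|" ++ p.2 else ""))
termination_by (items.map (fun it => it.1.length)).sum
decreasing_by exact pvSumTails_lt_attach items hlive

def reformat_table_alt (lines : List String) (right_margin : Int) : List String :=
  let items := lines.map (fun line =>
    (((PySem.Str.split? line "|").getD []).map PySem.Str.rstrip,
     if PySem.Set.equal (PySem.Set.ofList (PySem.Str.strip line).toList)
        (PySem.Set.ofList ['-', '|']) then "-" else " "))
  pvPadCols items right_margin

-- ===== PRECONDITION & SPEC =====
-- Pre_ excludes only lines = [], where Python A raises IndexError at lines[0].
def Pre_reformat_table (lines : List String) (right_margin : Int) : Prop := lines ≠ []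
instance (lines : List String) (right_margin : Int) : Decidable (Pre_reformat_table lines right_margin) := by unfold Pre_reformat_table; infer_instance
def pvWitness_reformat_table : List String × Int := (["a |bb", "--|--"], 1)

-- On lines = [] A raises IndexError (lines[0]); B naturally returns [].
def Raises_reformat_table (lines : List String) (right_margin : Int) : Prop := lines = []
instance (lines : List String) (right_margin : Int) : Decidable (Raises_reformat_table lines right_margin) := by unfold Raises_reformat_table; infer_instance
def pvRaiseWitness_reformat_table : List String × Int := ([], 0)
def pvRaiseWitnessOut_reformat_table : List String := []

def Spec_reformat_table (lines : List String) (right_margin : Int) (out : List String) : Prop := out = reformat_table_alt lines right_margin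
instance (lines : List String) (right_margin : Int) (out : List String) : Decidable (Spec_reformat_table lines right_margin out) := by unfold Spec_reformat_table; infer_instance

-- ===== CLAIM (what is proved, stated in full; the proofs are below) =====
def Claim_equal_reformat_table : Prop := ∀ (lines : List String) (right_margin : Int), Dom_reformat_table lines right_margin → Pre_reformat_table lines right_margin → Spec_reformat_table lines right_margin (reformat_table lines right_margin)
def Claim_raises_reformat_table : Prop := (∀ (lines : List String) (right_margin : Int), Dom_reformat_table lines right_margin → Raises_reformat_table lines right_margin → ¬ Pre_reformat_table lines right_margin) ∧ (Dom_reformat_table (pvRaiseWitness_reformat_table.1) (pvRaiseWitness_reformat_table.2) ∧ Raises_reformat_table (pvRaiseWitness_reformat_table.1) (pvRaiseWitness_reformat_table.2) ∧ reformat_table_alt (pvRaiseWitness_reformat_table.1) (pvRaiseWitness_reformat_table.2) = pvRaiseWitnessOut_reformat_table)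

-- ===== LEMMAS AND PROOFS =====
-- the column-wise width table both proofs meet at
def pvWs (rows : List (List String)) (rm : Int) : List Int :=
  (List.range ((PySem.List.max? (rows.map List.length) (fun x => x)).getD 0)).map
    (fun j => rm + (PySem.List.max? (rows.filterMap (fun r => r[j]?.map PySem.Str.len))
      (fun x => x)).getD 0)

-- one padded-and-joined output row, given the width table
def pvRow (W : List Int) (it : List String × String) : String :=
  PySem.Str.join "|" (List.zipWith
    (fun c w => c ++ pvRepeat it.2 (w - PySem.Str.len c)) it.1 W)

-- the per-line width contributions: (len(cell) + rm) for each cell of the line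
def pvF (rm : Int) (line : String) : List Int :=
  (pvCells line).map (fun x => PySem.Str.len x + rm)

-- pointwise maximum of two width lists, the longer one's tail kept
def pvMerge : List Int → List Int → List Int
  | [], b => b
  | a, [] => a
  | x :: a, y :: b => max x y :: pvMerge a b

def pvOmax : Option Int → Option Int → Option Int
  | none, o => o
  | o, none => o
  | some x, some y => some (max x y)

theorem pvOmax_none_left (o : Option Int) : pvOmax none o = o := by cases o <;> rfl
theorem pvOmax_none_right (o : Option Int) : pvOmax o none = o := by cases o <;> rfl
theorem pvOmax_self (o : Option Int) : pvOmax o o = o := by cases o <;> simp [pvOmax]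

theorem getElem?_pvMerge (a b : List Int) (j : Nat) :
    (pvMerge a b)[j]? = pvOmax a[j]? b[j]? := by
  induction a generalizing b j with
  | nil => cases b <;> simp [pvMerge, pvOmax_none_left]
  | cons x a ih =>
    cases b with
    | nil => simp [pvMerge, pvOmax_none_right]
    | cons y b =>
      cases j with
      | zero => simp [pvMerge, pvOmax]
      | succ j => simpa [pvMerge] using ih b j

theorem pvF_good (rm : Int) (line : String) : ∀ v ∈ pvF rm line, rm ≤ v := by
  intro v hv
  simp only [pvF, List.mem_map] at hv
  obtain ⟨x, -, rfl⟩ := hv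
  have : (0 : Int) ≤ PySem.Str.len x := by simp [PySem.Str.len_eq]
  omega

theorem pvMerge_mem (a b : List Int) : ∀ v ∈ pvMerge a b, v ∈ a ∨ v ∈ b := by
  induction a generalizing b with
  | nil => intro v hv; right; simpa [pvMerge] using hv
  | cons x a ih =>
    cases b with
    | nil => intro v hv; left; simpa [pvMerge] using hv
    | cons y b =>
      intro v hv
      simp only [pvMerge, List.mem_cons] at hv
      rcases hv with rfl | hv
      · rcases max_choice x y with h | h <;> simp [h]
      · rcases ih b v hv with h | h
        · exact Or.inl (List.mem_cons_of_mem _ h)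
        · exact Or.inr (List.mem_cons_of_mem _ h)

theorem pvMerge_good (rm : Int) (a b : List Int)
    (ha : ∀ v ∈ a, rm ≤ v) (hb : ∀ v ∈ b, rm ≤ v) : ∀ v ∈ pvMerge a b, rm ≤ v := by
  intro v hv
  rcases pvMerge_mem a b v hv with h | h
  · exact ha v h
  · exact hb v h

-- padding the short side with rm is absorbed when every old entry is ≥ rm
theorem pvZip_replicate (rm : Int) (acc : List Int) (hg : ∀ v ∈ acc, rm ≤ v) :
    List.zipWith max (List.replicate acc.length rm) acc = acc := by
  induction acc with
  | nil => rfl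
  | cons a t ih =>
    have h : max rm a = a := max_eq_right (hg a (by simp))
    simp only [List.length_cons, List.replicate_succ, List.zipWith_cons_cons, h]
    rw [ih (fun v hv => hg v (List.mem_cons_of_mem _ hv))]

theorem pvZipWith_max_self (c : List Int) : List.zipWith max c c = c := by
  induction c with
  | nil => rfl
  | cons x c ih => simp [ih]

theorem pvStep_short (rm : Int) (c acc : List Int) (h : c.length ≤ acc.length)
    (hg : ∀ v ∈ acc, rm ≤ v) :
    List.zipWith max (c ++ List.replicate (acc.length - c.length) rm) acc = pvMerge acc c := by
  induction acc generalizing c with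
  | nil =>
    have hc : c = [] := List.eq_nil_of_length_eq_zero (Nat.le_zero.mp h)
    subst hc; rfl
  | cons a t ih =>
    cases c with
    | nil =>
      simpa [pvMerge] using pvZip_replicate rm (a :: t) hg
    | cons x c =>
      simp only [List.length_cons, List.cons_append, List.zipWith_cons_cons, pvMerge,
        Nat.succ_sub_succ]
      rw [max_comm x a, ih c (by simpa using h) (fun v hv => hg v (List.mem_cons_of_mem _ hv))]

theorem pvStep_long (rm : Int) (acc c : List Int) (h : acc.length ≤ c.length) :
    List.zipWith max c (acc ++ List.drop acc.length c) = pvMerge acc c := by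
  induction acc generalizing c with
  | nil => simpa [pvMerge] using pvZipWith_max_self c
  | cons a t ih =>
    cases c with
    | nil => simp at h
    | cons x c =>
      simp only [List.length_cons, List.cons_append, List.drop_succ_cons,
        List.zipWith_cons_cons, pvMerge]
      rw [max_comm x a, ih c (by simpa using h)]

theorem pvLen_empty : PySem.Str.len "" = 0 := by decide

theorem pvStepA_eq_merge (rm : Int) (acc : List Int) (line : String)
    (hg : ∀ v ∈ acc, rm ≤ v) :
    pvStepA rm acc line = pvMerge acc (pvF rm line) := by
  unfold pvStepA
  have hpvF : List.map (fun x => PySem.Str.len x + rm) (pvCells line) = pvF rm line := rfl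
  have hlen : (pvF rm line).length = (pvCells line).length := by simp [pvF]
  by_cases h1 : (pvCells line).length < acc.length
  · simp only [if_pos h1]
    rw [← List.zipWith_map_left]
    have hmap : (pvCells line ++ List.replicate (acc.length - (pvCells line).length) "").map
        (fun x => PySem.Str.len x + rm)
        = pvF rm line ++ List.replicate (acc.length - (pvF rm line).length) rm := by
      simp [pvF, List.map_replicate, pvLen_empty, hlen]
    rw [hmap, pvStep_short rm _ acc (by omega) hg]
  · by_cases h2 : acc.length < (pvCells line).length
    · simp only [if_neg h1, if_pos h2]
      rw [PySem.List.slice_from_neg_natCast (pvCells line) ((pvCells line).length - acc.length)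
        (by omega)]
      have hdrop : (pvCells line).length - ((pvCells line).length - acc.length) = acc.length := by
        omega
      rw [hdrop, ← List.zipWith_map_left]
      have hmapd : (acc ++ (List.drop acc.length (pvCells line)).map
          (fun x => PySem.Str.len x + rm))
          = acc ++ List.drop acc.length (pvF rm line) := by
        simp [pvF, List.map_drop]
      rw [hmapd, hpvF, pvStep_long rm acc _ (by omega)]
    · simp only [if_neg h1, if_neg h2]
      rw [← List.zipWith_map_left, hpvF]
      have hd : List.drop acc.length (pvF rm line) = [] :=
        List.drop_eq_nil_of_le (by omega)
      have := pvStep_long rm acc (pvF rm line) (by omega)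
      rw [hd, List.append_nil] at this
      exact this

theorem pvFold_eq (rm : Int) (ls : List String) :
    ∀ acc, (∀ v ∈ acc, rm ≤ v) →
    ls.foldl (pvStepA rm) acc = ls.foldl (fun a l => pvMerge a (pvF rm l)) acc := by
  induction ls with
  | nil => intro acc _; rfl
  | cons l ls ih =>
    intro acc hg
    simp only [List.foldl_cons]
    rw [pvStepA_eq_merge rm acc l hg]
    exact ih _ (pvMerge_good rm acc (pvF rm l) hg (pvF_good rm l))

theorem pvFoldMerge_get (rm : Int) (ls : List String) :
    ∀ (acc : List Int) (j : Nat),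
    (ls.foldl (fun a l => pvMerge a (pvF rm l)) acc)[j]?
      = ls.foldl (fun o l => pvOmax o ((pvF rm l)[j]?)) acc[j]? := by
  induction ls with
  | nil => intro acc j; rfl
  | cons l ls ih =>
    intro acc j
    simp only [List.foldl_cons]
    rw [ih, getElem?_pvMerge]

theorem pvFoldSome (os : List (Option Int)) :
    ∀ x, List.foldl pvOmax (some x) os = some (List.foldl max x (os.filterMap id)) := by
  induction os with
  | nil => intro x; rfl
  | cons o os ih =>
    intro x
    cases o with
    | none => simpa [pvOmax] using ih x
    | some y => simpa [pvOmax] using ih (max x y)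

theorem pvFoldNone (os : List (Option Int)) :
    List.foldl pvOmax none os
      = match os.filterMap id with
        | [] => none
        | x :: t => some (t.foldl max x) := by
  induction os with
  | nil => rfl
  | cons o os ih =>
    cases o with
    | none => simpa using ih
    | some x => simpa using pvFoldSome os x

theorem pvFilterMap_map {α β γ : Type} (h : α → Option β) (g : β → γ) (ls : List α) :
    ls.filterMap (fun a => (h a).map g) = (ls.filterMap h).map g := by
  induction ls with
  | nil => rfl
  | cons a ls ih =>
    cases hh : h a <;> simp [List.filterMap_cons, hh, ih]

theorem pvFoldMax_add (rm x : Int) (t : List Int) :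
    List.foldl max (x + rm) (t.map (fun v => v + rm)) = t.foldl max x + rm := by
  induction t generalizing x with
  | nil => rfl
  | cons y t ih => simpa [max_add_add_right] using ih (max x y)

-- the central width lemma: A's incremental accumulator equals the column-wise maxima
theorem pvWidths_eq (rm : Int) (l0 : String) (rest : List String) :
    (l0 :: rest).foldl (pvStepA rm) (pvF rm l0)
      = pvWs ((l0 :: rest).map pvCells) rm := by
  unfold pvWs
  set lines := l0 :: rest with hlines
  set N : Nat := (PySem.List.max? ((lines.map pvCells).map List.length) (fun x => x)).getD 0
    with hN
  -- the list of lengths is nonempty, so max? is some N and N bounds / is attained by lengths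
  obtain ⟨hNmax, hNatt⟩ :
      (∀ l ∈ lines, (pvCells l).length ≤ N) ∧ ∃ l ∈ lines, (pvCells l).length = N := by
    cases hm : PySem.List.max? ((lines.map pvCells).map List.length) (fun x => x) with
    | none =>
      exfalso
      have := (PySem.List.max?_eq_none_iff _ _).mp hm
      simp [hlines] at this
    | some M =>
      have hMN : N = M := by rw [hN, hm]; rfl
      have hmem := PySem.List.max?_mem hm
      have hmax := PySem.List.max?_isMax hm
      constructor
      · intro l hl
        have : (pvCells l).length ∈ (lines.map pvCells).map List.length := by
          simp only [List.map_map]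
          exact List.mem_map.mpr ⟨l, hl, rfl⟩
        simpa [hMN] using hmax _ this
      · simp only [List.map_map, List.mem_map] at hmem
        obtain ⟨l, hl, hlen⟩ := hmem
        exact ⟨l, hl, by simp [hMN, ← hlen]⟩
  apply List.ext_getElem?
  intro j
  -- LHS entry
  rw [pvFold_eq rm lines (pvF rm l0) (pvF_good rm l0)]
  rw [pvFoldMerge_get rm lines (pvF rm l0) j]
  rw [← List.foldl_map (f := fun l => (pvF rm l)[j]?) (g := pvOmax)]
  have hdup : List.foldl pvOmax (pvF rm l0)[j]? (lines.map (fun l => (pvF rm l)[j]?))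
      = List.foldl pvOmax none (lines.map (fun l => (pvF rm l)[j]?)) := by
    rw [hlines]
    simp only [List.map_cons, List.foldl_cons, pvOmax_none_left, pvOmax_self]
  rw [hdup, pvFoldNone]
  -- rewrite the filterMap to the per-column cell lengths K
  have hmapopt : (fun l => (pvF rm l)[j]?)
      = fun l => ((pvCells l)[j]?.map PySem.Str.len).map (fun v => v + rm) := by
    funext l
    simp only [pvF, List.getElem?_map, Option.map_map]
    rfl
  have hK : (lines.map (fun l => (pvF rm l)[j]?)).filterMap id
      = (lines.filterMap (fun l => (pvCells l)[j]?.map PySem.Str.len)).map (fun v => v + rm) := by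
    rw [hmapopt, List.filterMap_map]
    simpa using pvFilterMap_map (fun l => (pvCells l)[j]?.map PySem.Str.len) (fun v => v + rm)
      lines
  rw [hK]
  have hrows : (lines.map pvCells).filterMap (fun r => r[j]?.map PySem.Str.len)
      = lines.filterMap (fun l => (pvCells l)[j]?.map PySem.Str.len) := by
    rw [List.filterMap_map]; rfl
  -- case on whether column j is inhabited
  cases hKc : lines.filterMap (fun l => (pvCells l)[j]?.map PySem.Str.len) with
  | nil =>
    -- no line reaches column j, so j ≥ N and the RHS entry is also none
    have hjN : N ≤ j := by
      by_contra hlt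
      push_neg at hlt
      obtain ⟨l, hl, hlen⟩ := hNatt
      have hsome : (pvCells l)[j]? ≠ none := by
        rw [ne_eq, List.getElem?_eq_none_iff]
        omega
      have := (List.filterMap_eq_nil_iff.mp hKc) l hl
      rcases hc : (pvCells l)[j]? with _ | c
      · exact hsome hc
      · rw [hc] at this; simp at this
    simp [List.getElem?_eq_none_iff, hjN]
  | cons x t =>
    -- column j is inhabited, so j < N and both sides are rm + max of the lengths
    have hjN : j < N := by
      have hx : x ∈ lines.filterMap (fun l => (pvCells l)[j]?.map PySem.Str.len) := by
        rw [hKc]; simp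
      obtain ⟨l, hl, hsome⟩ := List.mem_filterMap.mp hx
      have : j < (pvCells l).length := by
        rcases hc : (pvCells l)[j]? with _ | c
        · rw [hc] at hsome; simp at hsome
        · exact (List.getElem?_eq_some_iff.mp hc).1
      exact lt_of_lt_of_le this (hNmax l hl)
    simp only [List.map_cons]
    rw [List.getElem?_map, List.getElem?_range hjN]
    simp only [Option.map_some]
    rw [hrows, hKc, PySem.List.max?_id_cons]
    simp only [Option.getD_some]
    rw [pvFoldMax_add]
    rw [Int.add_comm rm (t.foldl max x)]

-- rstrip is idempotent
theorem pvDropWhile_idem (p : Char → Bool) (l : List Char) :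
    (l.dropWhile p).dropWhile p = l.dropWhile p := by
  induction l with
  | nil => rfl
  | cons a t ih => by_cases h : p a <;> simp [h, ih]

theorem pvRstrip_idem (s : String) :
    PySem.Str.rstrip (PySem.Str.rstrip s) = PySem.Str.rstrip s := by
  apply String.ext
  simp [PySem.Str.toList_rstrip, PySem.Chars.rstrip, pvDropWhile_idem]

theorem pvCells_rstripped (line : String) : ∀ x ∈ pvCells line, PySem.Str.rstrip x = x := by
  intro x hx
  simp only [pvCells, List.mem_map] at hx
  obtain ⟨y, -, rfl⟩ := hx
  exact pvRstrip_idem y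

-- the padded cells: A re-rstrips the already rstripped cell, B does not
theorem pvZip_pad (f : String) (cols : List String) (hs : ∀ x ∈ cols, PySem.Str.rstrip x = x) :
    ∀ W : List Int,
    List.zipWith (fun x M => PySem.Str.rstrip x
        ++ pvRepeat f (M - PySem.Str.len (PySem.Str.rstrip x))) cols W
      = List.zipWith (fun c w => c ++ pvRepeat f (w - PySem.Str.len c)) cols W := by
  induction cols with
  | nil => intro W; rfl
  | cons x cols ih =>
    intro W
    cases W with
    | nil => rfl
    | cons w W =>
      simp only [List.zipWith_cons_cons]
      rw [hs x (by simp), ih (fun y hy => hs y (List.mem_cons_of_mem _ hy)) W]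

-- A's second pass, per line, equals the pvRow form over its lines
theorem pvPass2 (lines : List String) (W : List Int) :
    lines.map (fun line =>
      if PySem.Set.equal (PySem.Set.ofList (PySem.Str.strip line).toList)
          (PySem.Set.ofList ['-', '|']) then
        PySem.Str.join "|" (List.zipWith
          (fun x M => PySem.Str.rstrip x ++ pvRepeat "-" (M - PySem.Str.len (PySem.Str.rstrip x)))
          (pvCells line) W)
      else
        PySem.Str.join "|" (List.zipWith
          (fun x M => PySem.Str.rstrip x ++ pvRepeat " " (M - PySem.Str.len (PySem.Str.rstrip x)))
          (pvCells line) W))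
    = lines.map (fun line => pvRow W (pvCells line,
        if PySem.Set.equal (PySem.Set.ofList (PySem.Str.strip line).toList)
          (PySem.Set.ofList ['-', '|']) then "-" else " ")) := by
  apply List.map_congr_left
  intro line _
  by_cases h : PySem.Set.equal (PySem.Set.ofList (PySem.Str.strip line).toList)
      (PySem.Set.ofList ['-', '|']) = true
  · rw [if_pos h]
    simp only [pvRow, if_pos h]
    rw [pvZip_pad "-" (pvCells line) (pvCells_rstripped line) W]
  · rw [if_neg h]
    simp only [pvRow, if_neg h]
    rw [pvZip_pad " " (pvCells line) (pvCells_rstripped line) W]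

-- ---- bridge: the column peel equals the pvRow/pvWs form ----
theorem pvJoin_nil : PySem.Str.join "|" ([] : List String) = "" := by decide

theorem pvJoin_single (a : String) : PySem.Str.join "|" [a] = a := by
  apply String.ext
  simp [PySem.Str.toList_join, PySem.Chars.join_singleton]

theorem pvJoin_cons (a : String) (l : List String) (hl : l ≠ []) :
    PySem.Str.join "|" (a :: l) = a ++ ("|" ++ PySem.Str.join "|" l) := by
  cases l with
  | nil => exact absurd rfl hl
  | cons b t =>
    apply String.ext
    simp [PySem.Str.toList_join, PySem.Chars.join_cons_cons]

theorem pvMaxCols_ge (rows : List (List String)) (r : List String) (hr : r ∈ rows) :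
    r.length ≤ (PySem.List.max? (rows.map List.length) (fun x => x)).getD 0 := by
  cases hm : PySem.List.max? (rows.map List.length) (fun x => x) with
  | none =>
    exfalso
    have := (PySem.List.max?_eq_none_iff _ _).mp hm
    rw [List.map_eq_nil_iff] at this
    exact (List.ne_nil_of_mem hr) this
  | some M =>
    have := PySem.List.max?_isMax hm r.length (List.mem_map.mpr ⟨r, hr, rfl⟩)
    simpa using this

theorem pvFoldMaxNat_sub (x : Nat) (t : List Nat) :
    (t.map (fun v => v - 1)).foldl max (x - 1) = t.foldl max x - 1 := by
  induction t generalizing x with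
  | nil => rfl
  | cons y t ih =>
    simp only [List.map_cons, List.foldl_cons]
    rw [show max (x - 1) (y - 1) = max x y - 1 by omega, ih]

theorem pvMaxCols_tails (rows : List (List String)) (hne : rows ≠ []) :
    (PySem.List.max? ((rows.map (List.drop 1)).map List.length) (fun x => x)).getD 0
      = (PySem.List.max? (rows.map List.length) (fun x => x)).getD 0 - 1 := by
  cases rows with
  | nil => exact absurd rfl hne
  | cons r t =>
    have h2 : ((r :: t).map (List.drop 1)).map List.length
        = (r.length - 1) :: (t.map List.length).map (fun v => v - 1) := by
      simp [List.map_map, Function.comp]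
    rw [h2, show (r :: t).map List.length = r.length :: t.map List.length from rfl,
      PySem.List.max?_id_cons, PySem.List.max?_id_cons]
    simp only [Option.getD_some]
    exact pvFoldMaxNat_sub _ _

theorem pvWs_length (rows : List (List String)) (rm : Int) :
    (pvWs rows rm).length = (PySem.List.max? (rows.map List.length) (fun x => x)).getD 0 := by
  simp [pvWs]

theorem pvWs_cons (rows : List (List String)) (rm : Int)
    (h : ∃ r ∈ rows, r ≠ []) :
    pvWs rows rm
      = (rm + (PySem.List.max? (rows.filterMap (fun r => r[0]?.map PySem.Str.len))
          (fun x => x)).getD 0)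
        :: pvWs (rows.map (List.drop 1)) rm := by
  obtain ⟨r0, hr0, hne0⟩ := h
  have hN1 : 1 ≤ (PySem.List.max? (rows.map List.length) (fun x => x)).getD 0 := by
    have h1 := pvMaxCols_ge rows r0 hr0
    have h2 : 1 ≤ r0.length := by
      cases r0 with
      | nil => exact absurd rfl hne0
      | cons a b => simp
    omega
  unfold pvWs
  obtain ⟨m, hm⟩ : ∃ m, (PySem.List.max? (rows.map List.length) (fun x => x)).getD 0 = m + 1 :=
    ⟨(PySem.List.max? (rows.map List.length) (fun x => x)).getD 0 - 1, by omega⟩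
  rw [hm, List.range_succ_eq_map, List.map_cons]
  congr 1
  rw [List.map_map, pvMaxCols_tails rows (List.ne_nil_of_mem hr0), hm]
  simp only [Nat.add_sub_cancel]
  apply List.map_congr_left
  intro j _
  simp only [Function.comp]
  congr 2
  rw [List.filterMap_map]
  have hf : (fun r : List String => ((r.drop 1)[j]?.map PySem.Str.len))
      = fun r : List String => r[j + 1]?.map PySem.Str.len := by
    funext r
    rw [List.getElem?_drop, Nat.add_comm]
  simp only [Function.comp]
  rw [hf]

-- the live heads of the peel are exactly the column-0 cell lengths
theorem pvHeads_eq (items : List (List String × String)) :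
    (items.filter (fun it => !it.1.isEmpty)).map (fun it => PySem.Str.len (it.1.headD ""))
      = (items.map Prod.fst).filterMap (fun r => r[0]?.map PySem.Str.len) := by
  induction items with
  | nil => rfl
  | cons a t ih =>
    rcases a with ⟨r, f⟩
    cases r with
    | nil => simpa using ih
    | cons c cs => simpa using ih

theorem pvZipMap {α β γ : Type} (f : α → β) (h : α × β → γ) (l : List α) :
    (l.zip (l.map f)).map h = l.map (fun a => h (a, f a)) := by
  induction l with
  | nil => rfl
  | cons a t ih => simp [ih]

-- main bridge, by strong induction on the total number of cells
theorem pvPadCols_base (items : List (List String × String))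
    (hf : items.filter (fun it => !it.1.isEmpty) = []) (W : List Int) :
    items.map (fun _ => "") = items.map (pvRow W) := by
  apply List.map_congr_left
  intro it hit
  have h0 := (List.filter_eq_nil_iff.mp hf) it hit
  have h1 : it.1 = [] := by
    cases hc : it.1 with
    | nil => rfl
    | cons c cs => rw [hc] at h0; simp at h0
  simp [pvRow, h1, pvJoin_nil]

theorem pvPadCols_eq_aux (rm : Int) (n : Nat) :
    ∀ items : List (List String × String),
    (items.map (fun it => it.1.length)).sum ≤ n →
    pvPadCols items rm = items.map (pvRow (pvWs (items.map Prod.fst) rm)) := by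
  induction n with
  | zero =>
    intro items hle
    have hf : items.filter (fun it => !it.1.isEmpty) = [] := by
      rw [List.filter_eq_nil_iff]
      intro it hit
      have h1 : it.1.length ∈ items.map (fun it => it.1.length) :=
        List.mem_map.mpr ⟨it, hit, rfl⟩
      have h2 := List.le_sum_of_mem h1
      have h3 : it.1 = [] := List.eq_nil_of_length_eq_zero (by omega)
      simp [h3]
    rw [pvPadCols]
    simp only [dif_pos hf]
    exact pvPadCols_base items hf _
  | succ n ih =>
    intro items hle
    by_cases hf : items.filter (fun it => !it.1.isEmpty) = []
    · rw [pvPadCols]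
      simp only [dif_pos hf]
      exact pvPadCols_base items hf _
    · rw [pvPadCols]
      simp only [dif_neg hf]
      have hsum : ((items.map (fun it => (it.1.drop 1, it.2))).map
          (fun it => it.1.length)).sum ≤ n := by
        have h1 := pvSumTails_lt items hf
        omega
      rw [ih _ hsum]
      have hfst : (items.map (fun it => (it.1.drop 1, it.2))).map Prod.fst
          = (items.map Prod.fst).map (List.drop 1) := by
        simp [List.map_map]
      rw [hfst, pvHeads_eq items]
      have hex : ∃ r ∈ items.map Prod.fst, r ≠ [] := by
        by_contra hno
        apply hf
        rw [List.filter_eq_nil_iff]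
        intro it hit
        push_neg at hno
        have h1 := hno it.1 (List.mem_map.mpr ⟨it, hit, rfl⟩)
        simp [h1]
      rw [pvWs_cons _ rm hex, List.map_map, pvZipMap]
      apply List.map_congr_left
      intro it hit
      rcases hc : it.1 with _ | ⟨c, cs⟩
      · simp [pvRow, hc, pvJoin_nil]
      · simp only [hc]
        cases cs with
        | nil => simp [pvRow, hc, pvJoin_single]
        | cons c1 cs' =>
          have hlen1 : 1 ≤ (pvWs ((items.map Prod.fst).map (List.drop 1)) rm).length := by
            rw [pvWs_length]
            have hmem : it.1.drop 1 ∈ (items.map Prod.fst).map (List.drop 1) :=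
              List.mem_map.mpr ⟨it.1, List.mem_map.mpr ⟨it, hit, rfl⟩, rfl⟩
            have h2 := pvMaxCols_ge _ _ hmem
            rw [hc] at h2
            simp only [List.drop_succ_cons, List.drop_zero, List.length_cons] at h2
            omega
          rcases hW : pvWs ((items.map Prod.fst).map (List.drop 1)) rm with _ | ⟨w1, Wrest⟩
          · rw [hW] at hlen1; simp at hlen1
          · simp only [pvRow, hc, hW, List.zipWith_cons_cons, List.drop_succ_cons,
              List.drop_zero]
            rw [pvJoin_cons _ _ (by simp)]
            simp [pvRow, Function.comp, hc, String.append_assoc]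

theorem pvPadCols_eq (rm : Int) (items : List (List String × String)) :
    pvPadCols items rm = items.map (pvRow (pvWs (items.map Prod.fst) rm)) :=
  pvPadCols_eq_aux rm _ items le_rfl

-- ===== VERDICT helpers =====
theorem pvMw0 (rm : Int) (l0 : String) :
    ((PySem.Str.split? l0 "|").getD []).map
      (fun x => PySem.Str.len (PySem.Str.rstrip x) + rm) = pvF rm l0 := by
  simp only [pvF, pvCells, List.map_map]
  rfl

theorem pvA_cons (l0 : String) (rest : List String) (rm : Int) :
    reformat_table (l0 :: rest) rm
      = (l0 :: rest).map (fun line =>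
          if PySem.Set.equal (PySem.Set.ofList (PySem.Str.strip line).toList)
              (PySem.Set.ofList ['-', '|']) then
            PySem.Str.join "|" (List.zipWith
              (fun x M => PySem.Str.rstrip x
                ++ pvRepeat "-" (M - PySem.Str.len (PySem.Str.rstrip x)))
              (pvCells line)
              ((l0 :: rest).foldl (pvStepA rm) (((PySem.Str.split? l0 "|").getD []).map
                (fun x => PySem.Str.len (PySem.Str.rstrip x) + rm))))
          else
            PySem.Str.join "|" (List.zipWith
              (fun x M => PySem.Str.rstrip x
                ++ pvRepeat " " (M - PySem.Str.len (PySem.Str.rstrip x)))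
              (pvCells line)
              ((l0 :: rest).foldl (pvStepA rm) (((PySem.Str.split? l0 "|").getD []).map
                (fun x => PySem.Str.len (PySem.Str.rstrip x) + rm))))) := rfl

theorem pvB_eq (lines : List String) (rm : Int) :
    reformat_table_alt lines rm
      = lines.map (fun line => pvRow (pvWs (lines.map pvCells) rm) (pvCells line,
          if PySem.Set.equal (PySem.Set.ofList (PySem.Str.strip line).toList)
            (PySem.Set.ofList ['-', '|']) then "-" else " ")) := by
  show pvPadCols _ rm = _
  rw [pvPadCols_eq]
  rw [List.map_map, List.map_map]
  rfl

-- ===== VERDICT (by name: the statement is the Claim_ definition above) =====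
theorem reformat_table_spec : Claim_equal_reformat_table := by
  intro lines right_margin _ hpre
  unfold Spec_reformat_table
  match lines with
  | [] => exact absurd rfl hpre
  | l0 :: rest =>
    rw [pvA_cons l0 rest right_margin, pvB_eq (l0 :: rest) right_margin]
    rw [pvMw0, pvWidths_eq]
    exact pvPass2 (l0 :: rest) _

theorem reformat_table_raises : Claim_raises_reformat_table := by
  unfold Claim_raises_reformat_table
  refine ⟨fun lines rm _ hr hp => hp hr, by decide, by decide, ?_⟩
  show pvPadCols [] 0 = []
  rw [pvPadCols]
  rfl

-- self-check: the raise-witness component of reformat_table_raises, by name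
theorem pvRaiseWitness_ok :
    reformat_table_alt pvRaiseWitness_reformat_table.1 pvRaiseWitness_reformat_table.2
      = pvRaiseWitnessOut_reformat_table := reformat_table_raises.2.2.2
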